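-- pv_equiv track=rewrite | github.com/lyuqin/HydraNet-WikiSQL | wikisql_gendata.py | basic_tokenize
-- ===== SOURCE A (Python) =====
-- import unicodedata
--
-- def is_whitespace(c):
--     if c == " " or c == "\t" or c == "\n" or c == "\r":
--         return True
--     cat = unicodedata.category(c)
--     if cat == "Zs":
--         return True
--     return False
--
-- def is_punctuation(c):
--   """Checks whether `chars` is a punctuation character."""
--   cp = ord(c)
--   # We treat all non-letter/number ASCII as punctuation.
--   # Characters such as "^", "$", and "`" are not in the Unicode
--   # Punctuation class but we treat them as punctuation anyways, for
--   # consistency.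
--   if ((cp >= 33 and cp <= 47) or (cp >= 58 and cp <= 64) or
--       (cp >= 91 and cp <= 96) or (cp >= 123 and cp <= 126)):
--     return True
--   cat = unicodedata.category(c)
--   if cat.startswith("P") or cat.startswith("S"):
--     return True
--   return False
--
-- def basic_tokenize(doc):
--     doc_tokens = []
--     char_to_word = []
--     word_to_char_start = []
--     prev_is_whitespace = True
--     prev_is_punc = False
--     prev_is_num = False
--     for pos, c in enumerate(doc):
--         if is_whitespace(c):
--             prev_is_whitespace = True
--             prev_is_punc = False
--         else:
--             if prev_is_whitespace or is_punctuation(c) or prev_is_punc or (prev_is_num and not str(c).isnumeric()):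
--                 doc_tokens.append(c)
--                 word_to_char_start.append(pos)
--             else:
--                 doc_tokens[-1] += c
--             prev_is_whitespace = False
--             prev_is_punc = is_punctuation(c)
--             prev_is_num = str(c).isnumeric()
--         char_to_word.append(len(doc_tokens) - 1)
--
--     return doc_tokens, char_to_word, word_to_char_start
-- ===== SOURCE B (Python) =====
-- import unicodedata
--
-- def _is_ws(c):
--     if c == " " or c == "\t" or c == "\n" or c == "\r":
--         return True
--     return unicodedata.category(c) == "Zs"
--
-- def _is_punc(c):
--     cp = ord(c)
--     if ((33 <= cp <= 47) or (58 <= cp <= 64) or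
--             (91 <= cp <= 96) or (123 <= cp <= 126)):
--         return True
--     cat = unicodedata.category(c)
--     return cat.startswith("P") or cat.startswith("S")
--
-- def _boundary(q, c):
--     # a non-whitespace char c following a non-whitespace char q starts a new token iff
--     return _is_punc(c) or _is_punc(q) or (q.isnumeric() and not c.isnumeric())
--
-- def basic_tokenize(doc):
--     n = len(doc)
--     tokens, starts = [], []
--     pos = 0
--     while pos < n:
--         if _is_ws(doc[pos]):
--             pos += 1
--             continue
--         e = pos + 1
--         while e < n and not _is_ws(doc[e]) and not _boundary(doc[e - 1], doc[e]):
--             e += 1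
--         tokens.append(doc[pos:e])
--         starts.append(pos)
--         pos = e
--     char_to_word = []
--     k = 0
--     for p in range(n):
--         if k < len(starts) and starts[k] == p:
--             k += 1
--         char_to_word.append(k - 1)
--     return tokens, char_to_word, starts
-- ===== Notes on version B (the rewrite author's own statement) =====
-- stated objective: faster
-- what changed: Replaces A's per-character state-machine fold (threading prev_is_whitespace/punc/num flags and rebuilding the last token with doc_tokens[-1] += c on every char) with a split-like scanner that slices each whole token out at once using a local two-character boundary test, then computes char_to_word in a separate counting pass over the recorded token starts.
import Mathlib
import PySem

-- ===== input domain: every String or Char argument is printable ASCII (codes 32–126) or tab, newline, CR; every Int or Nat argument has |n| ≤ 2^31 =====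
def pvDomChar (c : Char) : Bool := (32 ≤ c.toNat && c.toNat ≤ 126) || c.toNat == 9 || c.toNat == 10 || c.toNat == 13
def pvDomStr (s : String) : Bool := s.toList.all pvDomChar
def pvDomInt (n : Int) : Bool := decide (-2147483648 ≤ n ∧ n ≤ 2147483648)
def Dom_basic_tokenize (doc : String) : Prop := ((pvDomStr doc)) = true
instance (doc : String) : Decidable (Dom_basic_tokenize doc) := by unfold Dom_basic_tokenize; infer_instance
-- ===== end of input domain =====

-- B replaces A's per-character state-machine fold (which rebuilds the last token char by char)
-- by a split-like whole-token scanner with a local two-character boundary test, plus a separate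
-- counting pass over the token starts for char_to_word (objective: faster, as measured by the
-- timing run).

-- ===== PORT A =====
-- is_whitespace: the unicodedata category "Zs" check adds only non-ASCII spaces; on the
-- printable-ASCII + tab/newline/CR domain the four explicit characters are exact.
def pvWs (c : Char) : Bool := c == ' ' || c == '\t' || c == '\n' || c == '\r'

-- is_punctuation: on printable ASCII the four ordinal ranges already contain every character of
-- Unicode category P*/S*, so the category test adds nothing on the stated domain.
def pvPunc (c : Char) : Bool :=
  (33 ≤ c.toNat && c.toNat ≤ 47) || (58 ≤ c.toNat && c.toNat ≤ 64) ||
  (91 ≤ c.toNat && c.toNat ≤ 96) || (123 ≤ c.toNat && c.toNat ≤ 126)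

-- str.isnumeric: on ASCII exactly the decimal digits.
def pvNum (c : Char) : Bool := '0' ≤ c && c ≤ '9'

structure StA where
  toks : List (List Char)
  c2w : List Int
  starts : List Int
  pw : Bool
  pp : Bool
  pn : Bool

-- one iteration of A's `for pos, c in enumerate(doc)` loop body
def stepA (st : StA) (pc : Int × Char) : StA :=
  if pvWs pc.2 then
    { st with pw := true, pp := false,
              c2w := st.c2w ++ [(st.toks.length : Int) - 1] }
  else
    let st' :=
      if st.pw || pvPunc pc.2 || st.pp || (st.pn && !pvNum pc.2) then
        { st with toks := st.toks ++ [[pc.2]], starts := st.starts ++ [pc.1] }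
      else
        { st with toks := st.toks.dropLast ++ [st.toks.getLastD [] ++ [pc.2]] }
    { st' with c2w := st'.c2w ++ [(st'.toks.length : Int) - 1],
               pw := false, pp := pvPunc pc.2, pn := pvNum pc.2 }

def basic_tokenize (doc : String) : List String × List Int × List Int :=
  let st := (PySem.List.enumerate doc.toList).foldl stepA ⟨[], [], [], true, false, false⟩
  (st.toks.map String.mk, st.c2w, st.starts)

-- ===== PORT B =====
-- _boundary(q, c) of Source B
def pvBoundary (q c : Char) : Bool := pvPunc c || pvPunc q || (pvNum q && !pvNum c)

-- the inner `while` of Source B: continuation chars of the token after prev char q, and the rest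
def grabB (q : Char) : List Char → List Char × List Char
  | [] => ([], [])
  | c :: cs =>
    if !pvWs c && !pvBoundary q c then
      (c :: (grabB c cs).1, (grabB c cs).2)
    else ([], c :: cs)

theorem grabB_rest_le (q : Char) (cs : List Char) : (grabB q cs).2.length ≤ cs.length := by
  induction cs generalizing q with
  | nil => simp [grabB]
  | cons c cs ih =>
    simp only [grabB]
    split
    · exact le_trans (ih c) (Nat.le_succ _)
    · simp

-- the outer `while pos < n` loop of Source B: tokens and their start positions
def scanB : List Char → Int → List (List Char) × List Int
  | [], _ => ([], [])
  | c :: cs, pos =>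
    if pvWs c then scanB cs (pos + 1)
    else
      let r := scanB (grabB c cs).2 (pos + 1 + ((grabB c cs).1.length : Int))
      ((c :: (grabB c cs).1) :: r.1, pos :: r.2)
termination_by cs _ => cs.length
decreasing_by
  · simp
  · exact Nat.lt_succ_of_le (grabB_rest_le c cs)

-- the char_to_word counting pass of Source B
def c2wB (n : Nat) (ss : List Int) : List Int :=
  ((List.range n).foldl
    (fun (st : Nat × List Int) (p : Nat) =>
      let k := if st.1 < ss.length ∧ ss.getD st.1 0 = (p : Int) then st.1 + 1 else st.1
      (k, st.2 ++ [(k : Int) - 1]))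
    (0, [])).2

def basic_tokenize_alt (doc : String) : List String × List Int × List Int :=
  let cs := doc.toList
  let r := scanB cs 0
  (r.1.map String.mk, c2wB cs.length r.2, r.2)

-- ===== PRECONDITION & SPEC =====
def Spec_basic_tokenize (doc : String) (out : List String × List Int × List Int) : Prop := out = basic_tokenize_alt doc
instance (doc : String) (out : List String × List Int × List Int) : Decidable (Spec_basic_tokenize doc out) := by unfold Spec_basic_tokenize; infer_instance

-- ===== CLAIM (what is proved, stated in full; the proofs are below) =====
def Claim_equal_basic_tokenize : Prop := ∀ (doc : String), Dom_basic_tokenize doc → Spec_basic_tokenize doc (basic_tokenize doc)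

-- ===== LEMMAS AND PROOFS =====

-- the char_to_word segment produced from position pos over n chars, with base tokens already open
def Cmap (ss : List Int) : Int → Nat → Int → List Int
  | _, 0, _ => []
  | pos, n + 1, base =>
    (base + (ss.countP (fun s => decide (s ≤ pos)) : Int) - 1) :: Cmap ss (pos + 1) n base

theorem Cmap_const (ss : List Int) (k : Nat) :
    ∀ (m : Nat) (pos base : Int),
    (∀ i : Nat, i < m → ss.countP (fun s => decide (s ≤ pos + i)) = k) →
    Cmap ss pos m base = List.replicate m (base + k - 1) := by
  intro m
  induction m with
  | zero => intro pos base _; simp [Cmap]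
  | succ m ih =>
    intro pos base h
    have h0 := h 0 (Nat.succ_pos m)
    simp only [Nat.cast_zero, add_zero] at h0
    simp only [Cmap, h0, List.replicate_succ]
    refine congrArg _ (ih (pos + 1) base ?_)
    intro i hi
    have heq : pos + 1 + (i : Int) = pos + ((i + 1 : Nat) : Int) := by push_cast; ring
    rw [heq]
    exact h (i + 1) (by omega)

theorem Cmap_split (ss : List Int) :
    ∀ (m n : Nat) (pos base : Int),
    Cmap ss pos (m + n) base = Cmap ss pos m base ++ Cmap ss (pos + m) n base := by
  intro m
  induction m with
  | zero => intro n pos base; simp [Cmap]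
  | succ m ih =>
    intro n pos base
    have : m + 1 + n = (m + n) + 1 := by omega
    rw [this]
    simp only [Cmap, List.cons_append, ih]
    have heq : pos + 1 + (m : Int) = pos + ((m + 1 : Nat) : Int) := by push_cast; ring
    rw [heq]

theorem Cmap_cons (s : Int) (ss : List Int) :
    ∀ (m : Nat) (pos base : Int), s ≤ pos →
    Cmap (s :: ss) pos m base = Cmap ss pos m (base + 1) := by
  intro m
  induction m with
  | zero => intro pos base _; simp [Cmap]
  | succ m ih =>
    intro pos base h
    simp only [Cmap, List.countP_cons, decide_eq_true_eq, if_pos h]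
    rw [ih (pos + 1) base (by omega)]
    congr 1
    push_cast; ring

theorem grabB_append (q : Char) (cs : List Char) :
    (grabB q cs).1 ++ (grabB q cs).2 = cs := by
  induction cs generalizing q with
  | nil => simp [grabB]
  | cons c cs ih =>
    simp only [grabB]
    split
    · simpa using ih c
    · simp

theorem grabB_head (q : Char) (cs : List Char) :
    ∀ c cs', (grabB q cs).2 = c :: cs' → pvWs c = false →
    pvBoundary ((grabB q cs).1.getLastD q) c = true := by
  induction cs generalizing q with
  | nil => simp [grabB]
  | cons c cs ih =>
    simp only [grabB]
    split
    · intro d cs' h hw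
      rw [List.getLastD_cons]
      exact ih c d cs' h hw
    · rename_i hcond
      intro d cs' h hw
      simp only [List.cons.injEq] at h
      obtain ⟨rfl, rfl⟩ := h
      simp only [List.getLastD_nil]
      simp only [Bool.and_eq_true, Bool.not_eq_true', not_and, Bool.not_eq_false] at hcond
      exact hcond hw

theorem scanB_lb (cs : List Char) (pos : Int) :
    ∀ s ∈ (scanB cs pos).2, pos ≤ s := by
  induction cs, pos using scanB.induct with
  | case1 pos => simp [scanB]
  | case2 c cs pos hw ih =>
    simp only [scanB, hw, if_true]
    exact fun s hs => le_trans (by omega) (ih s hs)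
  | case3 c cs pos hw ih =>
    simp only [scanB, hw]
    intro s hs
    rcases List.mem_cons.mp hs with rfl | hs
    · exact le_refl _
    · have := ih s hs
      have hlen : (0 : Int) ≤ ((grabB c cs).1.length : Int) := by positivity
      omega

theorem scanB_sorted (cs : List Char) (pos : Int) :
    (scanB cs pos).2.Pairwise (· < ·) := by
  induction cs, pos using scanB.induct with
  | case1 pos => simp [scanB]
  | case2 c cs pos hw ih => simpa only [scanB, hw, if_true] using ih
  | case3 c cs pos hw ih =>
    simp only [scanB, hw]
    refine List.pairwise_cons.mpr ⟨?_, ih⟩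
    intro s hs
    have := scanB_lb (grabB c cs).2 (pos + 1 + ((grabB c cs).1.length : Int)) s hs
    have hlen : (0 : Int) ≤ ((grabB c cs).1.length : Int) := by positivity
    omega

theorem runA (rest : List Char) :
    ∀ (q : Char) (pos : Int) (T : List (List Char)) (t : List Char) (c2w ss : List Int),
    (PySem.List.enumerate rest pos).foldl stepA ⟨T ++ [t], c2w, ss, false, pvPunc q, pvNum q⟩ =
    (PySem.List.enumerate (grabB q rest).2 (pos + ((grabB q rest).1.length : Int))).foldl stepA
      ⟨T ++ [t ++ (grabB q rest).1],
       c2w ++ List.replicate (grabB q rest).1.length ((T.length : Int)),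
       ss, false, pvPunc ((grabB q rest).1.getLastD q), pvNum ((grabB q rest).1.getLastD q)⟩ := by
  induction rest with
  | nil =>
    intro q pos T t c2w ss
    simp [grabB]
  | cons c rest ih =>
    intro q pos T t c2w ss
    by_cases hc : (!pvWs c && !pvBoundary q c) = true
    · obtain ⟨hw, hb⟩ : pvWs c = false ∧ pvBoundary q c = false := by
        rcases Bool.and_eq_true .. |>.mp hc with ⟨h1, h2⟩
        exact ⟨Bool.not_eq_true' .. |>.mp h1, Bool.not_eq_true' .. |>.mp h2⟩
      have hgrab : grabB q (c :: rest) = (c :: (grabB c rest).1, (grabB c rest).2) := by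
        simp [grabB, hc]
      have hbs := hb
      simp only [pvBoundary, Bool.or_eq_false_iff] at hbs
      obtain ⟨⟨hb1, hb2⟩, hb3⟩ := hbs
      have hstep : stepA ⟨T ++ [t], c2w, ss, false, pvPunc q, pvNum q⟩ (pos, c) =
          ⟨T ++ [t ++ [c]], c2w ++ [(T.length : Int)], ss, false, pvPunc c, pvNum c⟩ := by
        simp only [stepA, hw, Bool.false_eq_true, if_false, hb1, hb2, hb3, Bool.or_false,
          List.dropLast_concat, List.getLastD_concat]
        simp
      rw [hgrab, PySem.List.enumerate_cons, List.foldl_cons, hstep,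
        ih c (pos + 1) T (t ++ [c]) (c2w ++ [(T.length : Int)]) ss]
      have e1 : pos + (((c :: (grabB c rest).1).length : Nat) : Int) =
          pos + 1 + ((grabB c rest).1.length : Int) := by
        simp only [List.length_cons]; push_cast; ring
      rw [e1, List.getLastD_cons]
      simp [List.replicate_succ, List.append_assoc]
    · have hc' : (!pvWs c && !pvBoundary q c) = false := by
        revert hc; cases (!pvWs c && !pvBoundary q c) <;> simp
      have hgrab : grabB q (c :: rest) = ([], c :: rest) := by
        simp [grabB, hc']
      rw [hgrab]
      simp

theorem runMain (cs : List Char) (pos : Int) :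
    ∀ (T : List (List Char)) (c2w ss0 : List Int) (pw pp pn : Bool),
    ((pw = true ∧ pp = false) ∨
      (pw = false ∧ ∃ q, pp = pvPunc q ∧ pn = pvNum q ∧
        ∀ c cs', cs = c :: cs' → pvWs c = false → pvBoundary q c = true)) →
    (((PySem.List.enumerate cs pos).foldl stepA ⟨T, c2w, ss0, pw, pp, pn⟩).toks,
     ((PySem.List.enumerate cs pos).foldl stepA ⟨T, c2w, ss0, pw, pp, pn⟩).c2w,
     ((PySem.List.enumerate cs pos).foldl stepA ⟨T, c2w, ss0, pw, pp, pn⟩).starts) =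
    (T ++ (scanB cs pos).1,
     c2w ++ Cmap (scanB cs pos).2 pos cs.length (T.length : Int),
     ss0 ++ (scanB cs pos).2) := by
  induction cs, pos using scanB.induct with
  | case1 pos =>
    intro T c2w ss0 pw pp pn _
    simp [scanB, Cmap]
  | case2 c cs pos hw ih =>
    intro T c2w ss0 pw pp pn _
    have hstep : stepA ⟨T, c2w, ss0, pw, pp, pn⟩ (pos, c) =
        ⟨T, c2w ++ [(T.length : Int) - 1], ss0, true, false, pn⟩ := by
      simp [stepA, hw]
    rw [PySem.List.enumerate_cons, List.foldl_cons, hstep]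
    rw [show scanB (c :: cs) pos = scanB cs (pos + 1) from by simp [scanB, hw]]
    rw [ih T (c2w ++ [(T.length : Int) - 1]) ss0 true false pn (Or.inl ⟨rfl, rfl⟩)]
    have hcount : (scanB cs (pos + 1)).2.countP (fun s => decide (s ≤ pos)) = 0 := by
      refine List.countP_eq_zero.mpr ?_
      intro s hs
      have := scanB_lb cs (pos + 1) s hs
      simp only [decide_eq_true_eq]
      omega
    have hC : Cmap (scanB cs (pos + 1)).2 pos (c :: cs).length (T.length : Int) =
        ((T.length : Int) - 1) :: Cmap (scanB cs (pos + 1)).2 (pos + 1) cs.length (T.length : Int) := by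
      simp [List.length_cons, Cmap, hcount]
    rw [hC]
    simp [List.append_assoc]
  | case3 c cs pos hw ih =>
    intro T c2w ss0 pw pp pn hyp
    have hw' : pvWs c = false := by simpa using hw
    -- the `if` condition of A's else-branch is true
    have hcond : (pw || pvPunc c || pp || (pn && !pvNum c)) = true := by
      rcases hyp with ⟨rfl, _⟩ | ⟨rfl, q, rfl, rfl, hq⟩
      · simp
      · have hb := hq c cs rfl hw'
        simp only [pvBoundary, Bool.or_eq_true, Bool.and_eq_true] at hb
        simp only [Bool.false_or, Bool.or_eq_true, Bool.and_eq_true]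
        tauto
    have hstep : stepA ⟨T, c2w, ss0, pw, pp, pn⟩ (pos, c) =
        ⟨T ++ [[c]], c2w ++ [(T.length : Int)], ss0 ++ [pos], false, pvPunc c, pvNum c⟩ := by
      simp only [stepA, hw', Bool.false_eq_true, if_false, hcond, if_true, StA.mk.injEq]
      simp
    rw [PySem.List.enumerate_cons, List.foldl_cons, hstep]
    have hA := runA cs c (pos + 1) T [c] (c2w ++ [(T.length : Int)]) (ss0 ++ [pos])
    rw [show (T ++ [[c]] : List (List Char)) = T ++ [([] : List Char) ++ [c]] from by simp] at hstep
    rw [hA]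
    set E := (grabB c cs).1 with hE
    set R := (grabB c cs).2 with hR
    have hIH := ih (T ++ [[c] ++ E]) (c2w ++ [(T.length : Int)] ++ List.replicate E.length ((T.length : Int)))
        (ss0 ++ [pos]) false (pvPunc (E.getLastD c)) (pvNum (E.getLastD c))
        (Or.inr ⟨rfl, E.getLastD c, rfl, rfl, by
          intro d cs' hd hwd
          exact grabB_head c cs d cs' (by rw [← hR, hd]) hwd⟩)
    simp only [List.nil_append] at hA hIH ⊢
    rw [hIH]
    -- assemble the three components
    have hscan : scanB (c :: cs) pos = ((c :: E) :: (scanB R (pos + 1 + (E.length : Int))).1,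
        pos :: (scanB R (pos + 1 + (E.length : Int))).2) := by
      simp only [scanB, hw', Bool.false_eq_true, if_false, ← hE, ← hR]
    rw [hscan]
    simp only [Prod.mk.injEq]
    refine ⟨?_, ?_, ?_⟩
    · simp [List.append_assoc]
    · -- char_to_word component
      have hcs : E ++ R = cs := by rw [hE, hR]; exact grabB_append c cs
      have hlen : (c :: cs).length = (1 + E.length) + R.length := by
        rw [← hcs]
        simp only [List.length_cons, List.length_append]
        omega
      have hlb := scanB_lb R (pos + 1 + (E.length : Int))
      have hsplit := Cmap_split (pos :: (scanB R (pos + 1 + (E.length : Int))).2)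
        (1 + E.length) R.length pos (T.length : Int)
      have hconst : Cmap (pos :: (scanB R (pos + 1 + (E.length : Int))).2) pos (1 + E.length)
          (T.length : Int) = List.replicate (1 + E.length) ((T.length : Int) + 1 - 1) := by
        refine Cmap_const _ 1 _ _ _ ?_
        intro i hi
        rw [List.countP_cons]
        have h1 : (scanB R (pos + 1 + (E.length : Int))).2.countP
            (fun s => decide (s ≤ pos + (i : Int))) = 0 := by
          refine List.countP_eq_zero.mpr ?_
          intro s hs
          have := hlb s hs
          simp only [decide_eq_true_eq]
          omega
        simp [h1]
      have hcons : Cmap (pos :: (scanB R (pos + 1 + (E.length : Int))).2)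
          (pos + ((1 + E.length : Nat) : Int)) R.length (T.length : Int) =
          Cmap (scanB R (pos + 1 + (E.length : Int))).2 (pos + ((1 + E.length : Nat) : Int))
            R.length ((T.length : Int) + 1) := by
        refine Cmap_cons _ _ _ _ _ ?_
        push_cast
        omega
      rw [hlen, hsplit, hconst, hcons]
      have e2 : pos + ((1 + E.length : Nat) : Int) = pos + 1 + (E.length : Int) := by
        push_cast; ring
      have e3 : ((T ++ [[c] ++ E]).length : Int) = (T.length : Int) + 1 := by
        simp
      rw [e2, e3]
      have e4 : (T.length : Int) + 1 - 1 = (T.length : Int) := by ring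
      rw [e4, Nat.add_comm 1 E.length]
      simp [List.replicate_succ, List.append_assoc]
    · simp [List.append_assoc]

theorem ptr1 (ss : List Int) (hs : ss.Pairwise (· < ·)) (p : Int) :
    (ss.countP (fun s => decide (s < p)) < ss.length ∧
      ss.getD (ss.countP (fun s => decide (s < p))) 0 = p) ↔ p ∈ ss := by
  induction ss with
  | nil => simp
  | cons a ss ih =>
    rcases List.pairwise_cons.mp hs with ⟨ha, hs'⟩
    by_cases hap : a < p
    · have hne : ¬ p = a := by omega
      simp only [List.countP_cons, decide_eq_true_eq, if_pos hap, List.length_cons,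
        List.getD_cons_succ, List.mem_cons, hne, false_or]
      rw [← ih hs']
      constructor <;> (rintro ⟨h1, h2⟩; exact ⟨by omega, h2⟩)
    · have hnm : p ∉ ss := by
        intro hm
        have := ha p hm
        omega
      have hcnt : (a :: ss).countP (fun s => decide (s < p)) = 0 := by
        refine List.countP_eq_zero.mpr ?_
        intro s hsm
        rcases List.mem_cons.mp hsm with rfl | hm
        · simpa using hap
        · have := ha s hm
          simp only [decide_eq_true_eq]
          omega
      rw [hcnt]
      simp only [List.getD_cons_zero, List.length_cons, List.mem_cons]
      constructor
      · rintro ⟨-, rfl⟩; exact Or.inl rfl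
      · rintro (rfl | hm)
        · exact ⟨Nat.succ_pos _, rfl⟩
        · exact absurd hm hnm

theorem ptr2 (ss : List Int) (hs : ss.Pairwise (· < ·)) (p : Int) :
    ss.countP (fun s => decide (s ≤ p)) =
      ss.countP (fun s => decide (s < p)) + (if p ∈ ss then 1 else 0) := by
  induction ss with
  | nil => simp
  | cons a ss ih =>
    rcases List.pairwise_cons.mp hs with ⟨ha, hs'⟩
    by_cases hap : a < p
    · have hne : ¬ p = a := by omega
      simp only [List.countP_cons, decide_eq_true_eq, if_pos hap, if_pos (le_of_lt hap),
        List.mem_cons, hne, false_or, ih hs']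
      split <;> omega
    · have hz1 : ss.countP (fun s => decide (s < p)) = 0 := by
        refine List.countP_eq_zero.mpr ?_
        intro s hsm; have := ha s hsm; simp only [decide_eq_true_eq]; omega
      have hz2 : ss.countP (fun s => decide (s ≤ p)) = 0 := by
        refine List.countP_eq_zero.mpr ?_
        intro s hsm; have := ha s hsm; simp only [decide_eq_true_eq]; omega
      have hnm : p ∉ ss := by
        intro hm; have := ha p hm; omega
      by_cases hpa : p = a
      · subst hpa
        simp [List.countP_cons, hz1, hz2, hap, hnm]
      · have hnle : ¬ a ≤ p := by
          rcases lt_or_ge p a with h | h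
          · omega
          · exact absurd (lt_of_le_of_ne h (Ne.symm hpa)) hap
        simp [List.countP_cons, hz1, hz2, hap, hnle, hpa, hnm]

theorem c2wB_eq (ss : List Int) (hs : ss.Pairwise (· < ·)) (h0 : ∀ s ∈ ss, 0 ≤ s)
    (n : Nat) : c2wB n ss = Cmap ss 0 n 0 := by
  have main : ∀ (m p0 : Nat) (acc : List Int),
      ((List.range' p0 m).foldl
        (fun (st : Nat × List Int) (p : Nat) =>
          (if st.1 < ss.length ∧ ss.getD st.1 0 = (p : Int) then st.1 + 1 else st.1,
           st.2 ++ [((if st.1 < ss.length ∧ ss.getD st.1 0 = (p : Int) then st.1 + 1 else st.1 : Nat) : Int) - 1]))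
        (ss.countP (fun s => decide (s < (p0 : Int))), acc)).2
      = acc ++ Cmap ss (p0 : Int) m 0 := by
    intro m
    induction m with
    | zero => intro p0 acc; simp [Cmap]
    | succ m ih =>
      intro p0 acc
      rw [List.range'_succ, List.foldl_cons]
      have hk : (if ss.countP (fun s => decide (s < (p0 : Int))) < ss.length ∧
            ss.getD (ss.countP (fun s => decide (s < (p0 : Int)))) 0 = (p0 : Int)
          then ss.countP (fun s => decide (s < (p0 : Int))) + 1
          else ss.countP (fun s => decide (s < (p0 : Int)))) =
          ss.countP (fun s => decide (s ≤ (p0 : Int))) := by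
        rw [ptr2 ss hs ((p0 : Int))]
        by_cases hm : ((p0 : Int)) ∈ ss
        · rw [if_pos ((ptr1 ss hs _).mpr hm), if_pos hm]
        · rw [if_neg (fun h => hm ((ptr1 ss hs _).mp h)), if_neg hm]
          omega
      have hshift : ss.countP (fun s => decide (s ≤ (p0 : Int))) =
          ss.countP (fun s => decide (s < ((p0 + 1 : Nat) : Int))) := by
        refine List.countP_congr ?_
        intro s _
        simp only [decide_eq_true_eq]
        constructor <;> (intro; push_cast at *; omega)
      simp only [hk, hshift]
      rw [ih (p0 + 1) (acc ++ [(ss.countP (fun s => decide (s < ((p0 + 1 : Nat) : Int))) : Int) - 1])]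
      simp only [Cmap, zero_add, List.append_assoc, List.singleton_append]
      rw [← hshift]
      have e1 : ((p0 : Int)) + 1 = (((p0 + 1 : Nat) : Int)) := by push_cast; ring
      rw [e1]
  have h00 : ss.countP (fun s => decide (s < ((0 : Nat) : Int))) = 0 := by
    refine List.countP_eq_zero.mpr ?_
    intro s hsm; have := h0 s hsm; simp only [decide_eq_true_eq]; omega
  have hmain := main n 0 []
  rw [h00] at hmain
  unfold c2wB
  rw [List.range_eq_range']
  simpa using hmain

-- ===== VERDICT (by name: the statement is the Claim_ definition above) =====
theorem basic_tokenize_spec : Claim_equal_basic_tokenize := by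
  intro doc _
  unfold Spec_basic_tokenize basic_tokenize basic_tokenize_alt
  have h := runMain doc.toList 0 [] [] [] true false false (Or.inl ⟨rfl, rfl⟩)
  simp only [List.nil_append, List.length_nil, Nat.cast_zero] at h
  have hb := c2wB_eq (scanB doc.toList 0).2 (scanB_sorted _ _)
    (fun s hs => scanB_lb _ 0 s hs) doc.toList.length
  rw [Prod.mk.injEq, Prod.mk.injEq] at h
  obtain ⟨h1, h2, h3⟩ := h
  simp only [h1, h2, h3, hb]
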